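-- pv_equiv track=rewrite | github.com/dojo-modeling/dojo | annotate/annotation/submit_views.py | split_on_wild_card
-- ===== SOURCE A (Python) =====
-- def split_on_wild_card(s):
--     if s.find("*") == -1:
--         if s.find("/") == -1:
--             return "", s
--         t = s.split("/")
--         return "/".join(t[:-1]), t[-1]
--
--     parent = []
--     children = []
--     flag = False
--     for x in s.split("/"):
--         if x.find("*") != -1:
--             flag = True
--         if flag:
--             children.append(x)
--         else:
--             parent.append(x)
--
--     if flag == False:
--         children = [parent[-1]]
--         del parent[-1]
--
--     if len(parent) > 1:
--         parent = "/".join(parent)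
--     else:
--         if len(parent) == 0:
--             parent = "/"
--         else:
--             parent = parent[0]
--
--     if len(children) > 1:
--         children = "/".join(children)
--     else:
--         children = children[0]
--
--     return parent, children
-- ===== SOURCE B (Python) =====
-- def split_on_wild_card(s):
--     t = s.split("/")
--     for i, x in enumerate(t):
--         if "*" in x:
--             return ("/" if i == 0 else "/".join(t[:i])), "/".join(t[i:])
--     return "/".join(t[:-1]), t[-1]
-- ===== Notes on version B (the rewrite author's own statement) =====
-- stated objective: simpler
-- what changed: Replaces A's flag-carrying accumulation loop (building parent/children lists element by element, then a four-way length branch with singleton-join special cases) by an early-return scan for the first wildcard component and direct slices t[:i]/t[i:] joined once.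
import Mathlib
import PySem

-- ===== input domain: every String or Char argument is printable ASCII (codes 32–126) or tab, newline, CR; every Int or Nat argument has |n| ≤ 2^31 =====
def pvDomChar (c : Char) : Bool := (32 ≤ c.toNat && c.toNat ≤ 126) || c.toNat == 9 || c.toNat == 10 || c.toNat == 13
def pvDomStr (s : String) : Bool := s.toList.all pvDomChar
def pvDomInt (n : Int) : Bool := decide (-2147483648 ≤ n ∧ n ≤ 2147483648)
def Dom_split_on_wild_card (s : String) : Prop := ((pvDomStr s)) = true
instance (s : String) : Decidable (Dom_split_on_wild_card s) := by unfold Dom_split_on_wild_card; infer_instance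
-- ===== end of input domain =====

-- B replaces A's flag-carrying accumulation loop and four-way length branches by an
-- early-return scan for the first wildcard component with direct slices (objective: simpler).

-- ===== PORT A =====
-- s.split("/") is PySem.Chars.splitOn on toList (exact: sep "/" is nonempty).
-- t[-1] / parent[0] / children[0] use pyGetD with default []: Python indexes these lists
-- only where they are nonempty (split always returns a nonempty list), so the default is never taken.
def split_on_wild_card (s : String) : String × String :=
  if PySem.Chars.find s.toList ['*'] = -1 then
    if PySem.Chars.find s.toList ['/'] = -1 then ("", s)
    else
      let t := PySem.Chars.splitOn s.toList ['/']
      (String.ofList (PySem.Chars.join ['/'] (PySem.List.slice t none (some (-1)))),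
       String.ofList (PySem.List.pyGetD t (-1) []))
  else
    let t := PySem.Chars.splitOn s.toList ['/']
    let st := t.foldl
      (fun (st : List (List Char) × List (List Char) × Bool) x =>
        let flag := if PySem.Chars.find x ['*'] ≠ -1 then true else st.2.2
        if flag then (st.1, st.2.1 ++ [x], flag) else (st.1 ++ [x], st.2.1, flag))
      ([], [], false)
    -- if flag == False: children = [parent[-1]]; del parent[-1]
    let pc :=
      if st.2.2 = false then
        (PySem.List.slice st.1 none (some (-1)), [PySem.List.pyGetD st.1 (-1) []])
      else (st.1, st.2.1)
    let parentS :=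
      if pc.1.length > 1 then PySem.Chars.join ['/'] pc.1
      else if pc.1.length = 0 then ['/'] else PySem.List.pyGetD pc.1 0 []
    let childrenS :=
      if pc.2.length > 1 then PySem.Chars.join ['/'] pc.2
      else PySem.List.pyGetD pc.2 0 []
    (String.ofList parentS, String.ofList childrenS)

-- ===== PORT B =====
-- the 'for i, x in enumerate(t): if "*" in x: return …' early-return scan of Source B
def altLoop (t : List (List Char)) : List (Int × List Char) → Option (String × String)
  | [] => none
  | (i, x) :: rest =>
    if PySem.Chars.isIn ['*'] x then
      some (if i = 0 then "/"
            else String.ofList (PySem.Chars.join ['/'] (PySem.List.slice t none (some i))),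
            String.ofList (PySem.Chars.join ['/'] (PySem.List.slice t (some i) none)))
    else altLoop t rest

def split_on_wild_card_alt (s : String) : String × String :=
  let t := PySem.Chars.splitOn s.toList ['/']
  match altLoop t (PySem.List.enumerate t) with
  | some r => r
  | none =>
      (String.ofList (PySem.Chars.join ['/'] (PySem.List.slice t none (some (-1)))),
       String.ofList (PySem.List.pyGetD t (-1) []))

-- ===== PRECONDITION & SPEC =====
def Spec_split_on_wild_card (s : String) (out : String × String) : Prop := out = split_on_wild_card_alt s
instance (s : String) (out : String × String) : Decidable (Spec_split_on_wild_card s out) := by unfold Spec_split_on_wild_card; infer_instance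

-- ===== CLAIM (what is proved, stated in full; the proofs are below) =====
def Claim_equal_split_on_wild_card : Prop := ∀ (s : String), Dom_split_on_wild_card s → Spec_split_on_wild_card s (split_on_wild_card s)

-- ===== LEMMAS AND PROOFS =====

-- reference single-char split on '/': (first component, remaining components)
def splitP : List Char → List Char × List (List Char)
  | [] => ([], [])
  | c :: r => let p := splitP r; if c = '/' then ([], p.1 :: p.2) else (c :: p.1, p.2)

theorem go_spec : ∀ (l : List Char) (fuel : Nat) (cur : List Char) (acc : List (List Char)),
    l.length < fuel →
    PySem.Chars.splitOn.go ['/'] fuel l cur acc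
      = acc.reverse ++ (cur.reverse ++ (splitP l).1) :: (splitP l).2 := by
  intro l
  induction l with
  | nil =>
    intro fuel cur acc h
    cases fuel with
    | zero => omega
    | succ f => simp [PySem.Chars.splitOn.go, splitP]
  | cons c rest ih =>
    intro fuel cur acc h
    cases fuel with
    | zero => simp at h
    | succ f =>
      rw [PySem.Chars.splitOn.go]
      by_cases hc : c = '/'
      · subst hc
        simp only [List.isPrefixOf, BEq.rfl, Bool.and_true, if_true, List.length_cons,
          List.drop_succ_cons, List.length_nil, List.drop_zero]
        rw [ih f [] (cur.reverse :: acc) (by simpa using Nat.lt_of_succ_lt_succ h)]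
        simp [splitP]
      · have hpre : ['/'].isPrefixOf (c :: rest) = false := by
          simp [List.isPrefixOf]; exact fun hcc => absurd hcc.symm hc
        simp only [hpre, Bool.false_eq_true, if_false]
        rw [ih f (c :: cur) acc (by simpa using Nat.lt_of_succ_lt_succ h)]
        simp [splitP, hc]

theorem splitOn_eq (cs : List Char) :
    PySem.Chars.splitOn cs ['/'] = (splitP cs).1 :: (splitP cs).2 := by
  unfold PySem.Chars.splitOn
  rw [go_spec cs (cs.length + 1) [] [] (by omega)]
  simp

theorem splitP_no_slash (cs : List Char) (h : '/' ∉ cs) : splitP cs = (cs, []) := by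
  induction cs with
  | nil => simp [splitP]
  | cons c r ih =>
    simp only [List.mem_cons, not_or] at h
    simp [splitP, Ne.symm h.1, ih h.2]

theorem splitP_slash (r : List Char) : splitP ('/' :: r) = ([], (splitP r).1 :: (splitP r).2) := by
  simp [splitP]

theorem splitP_cons (a : Char) (r : List Char) (ha : a ≠ '/') :
    splitP (a :: r) = (a :: (splitP r).1, (splitP r).2) := by
  simp [splitP, ha]

theorem splitP_mem (cs : List Char) (c : Char) (hc : c ≠ '/') :
    c ∈ cs ↔ c ∈ (splitP cs).1 ∨ ∃ x ∈ (splitP cs).2, c ∈ x := by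
  induction cs with
  | nil => simp [splitP]
  | cons a r ih =>
    by_cases ha : a = '/'
    · subst ha
      rw [splitP_slash]
      simp only [List.mem_cons, List.not_mem_nil, false_or]
      constructor
      · rintro (h | h)
        · exact absurd h hc
        · rcases ih.mp h with h' | ⟨x, hx, hcx⟩
          · exact ⟨(splitP r).1, Or.inl rfl, h'⟩
          · exact ⟨x, Or.inr hx, hcx⟩
      · rintro ⟨x, hx, hcx⟩
        rcases hx with rfl | hx
        · exact Or.inr (ih.mpr (Or.inl hcx))
        · exact Or.inr (ih.mpr (Or.inr ⟨x, hx, hcx⟩))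
    · rw [splitP_cons a r ha]
      simp only [List.mem_cons]
      rw [ih]
      tauto

theorem singleton_infix_iff (c : Char) (l : List Char) : [c] <:+: l ↔ c ∈ l := by
  constructor
  · rintro ⟨u, v, rfl⟩; simp
  · intro h
    rcases List.mem_iff_append.mp h with ⟨u, v, rfl⟩
    exact ⟨u, v, by simp⟩

theorem find_star_iff (x : List Char) : (PySem.Chars.find x ['*'] = -1) ↔ '*' ∉ x := by
  rw [PySem.Chars.find_eq_neg_one_iff, singleton_infix_iff]

theorem isIn_star_iff (x : List Char) : PySem.Chars.isIn ['*'] x = true ↔ '*' ∈ x := by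
  rw [PySem.Chars.isIn_iff_infix, singleton_infix_iff]

-- the Bool predicate both loops test
def hasStar (x : List Char) : Bool := decide ('*' ∈ x)

theorem hasStar_find (x : List Char) :
    (if PySem.Chars.find x ['*'] ≠ -1 then true else false) = hasStar x := by
  by_cases h : PySem.Chars.find x ['*'] = -1
  · simp [h, hasStar, (find_star_iff x).mp h]
  · have hm : '*' ∈ x := by
      by_contra hn; exact h ((find_star_iff x).mpr hn)
    simp [h, hasStar, hm]

theorem hasStar_isIn (x : List Char) : PySem.Chars.isIn ['*'] x = hasStar x := by
  by_cases h : '*' ∈ x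
  · simp only [hasStar, h, decide_true]
    exact (isIn_star_iff x).mpr h
  · simp only [hasStar, h, decide_false]
    rw [← Bool.not_eq_true, isIn_star_iff]
    exact h

-- A's loop once the flag is true: everything goes to children
theorem foldA_true (t : List (List Char)) (pa ca : List (List Char)) :
    t.foldl
      (fun (st : List (List Char) × List (List Char) × Bool) x =>
        let flag := if PySem.Chars.find x ['*'] ≠ -1 then true else st.2.2
        if flag then (st.1, st.2.1 ++ [x], flag) else (st.1 ++ [x], st.2.1, flag))
      (pa, ca, true) = (pa, ca ++ t, true) := by
  induction t generalizing ca with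
  | nil => simp
  | cons x r ih =>
    simp only [List.foldl_cons]
    have hc : (if PySem.Chars.find x ['*'] ≠ -1 then true else true) = true := by
      split <;> rfl
    simp only [hc, if_true]
    rw [ih]
    simp

-- A's loop from a flag-false state: take/drop at the first wildcard component
theorem foldA_false (t : List (List Char)) (pa ca : List (List Char)) :
    t.foldl
      (fun (st : List (List Char) × List (List Char) × Bool) x =>
        let flag := if PySem.Chars.find x ['*'] ≠ -1 then true else st.2.2
        if flag then (st.1, st.2.1 ++ [x], flag) else (st.1 ++ [x], st.2.1, flag))
      (pa, ca, false)
    = if t.any hasStar then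
        (pa ++ t.takeWhile (fun x => !hasStar x), ca ++ t.dropWhile (fun x => !hasStar x), true)
      else (pa ++ t, ca, false) := by
  induction t generalizing pa with
  | nil => simp
  | cons x r ih =>
    simp only [List.foldl_cons, List.any_cons]
    by_cases hxp : hasStar x = true
    · have hx : hasStar x = true := hxp
      have hcond : (if PySem.Chars.find x ['*'] ≠ -1 then true else false) = true := by
        rw [hasStar_find]; exact hx
      simp only [hcond, if_true]
      rw [foldA_true]
      rw [List.takeWhile_cons_of_neg (by simp [hx]), List.dropWhile_cons_of_neg (by simp [hx])]
      simp [hx]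
    · have hx : hasStar x = false := by simpa using hxp
      have hcond : (if PySem.Chars.find x ['*'] ≠ -1 then true else false) = false := by
        rw [hasStar_find]; exact hx
      simp only [hcond, Bool.false_eq_true, if_false]
      rw [ih (pa ++ [x])]
      rw [List.takeWhile_cons_of_pos (by simp [hx]), List.dropWhile_cons_of_pos (by simp [hx])]
      simp [hx]

-- B's scan over enumerate: first wildcard component, slices of the full list
theorem altLoop_spec (suf pre : List (List Char)) :
    altLoop (pre ++ suf) (PySem.List.enumerate suf (pre.length : Int))
    = if suf.any hasStar then
        some (if (pre ++ suf.takeWhile (fun x => !hasStar x)) = [] then "/"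
              else String.ofList (PySem.Chars.join ['/'] (pre ++ suf.takeWhile (fun x => !hasStar x))),
              String.ofList (PySem.Chars.join ['/'] (suf.dropWhile (fun x => !hasStar x))))
      else none := by
  induction suf generalizing pre with
  | nil => simp [PySem.List.enumerate, altLoop]
  | cons x r ih =>
    rw [PySem.List.enumerate_cons]
    simp only [altLoop, hasStar_isIn, List.any_cons]
    by_cases hxp : hasStar x = true
    · have hx : hasStar x = true := hxp
      simp only [hx, if_true, Bool.true_or]
      rw [List.takeWhile_cons_of_neg (by simp [hx]), List.dropWhile_cons_of_neg (by simp [hx])]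
      rw [PySem.List.slice_to_natCast, PySem.List.slice_from_natCast,
        List.take_left, List.drop_left]
      simp
    · have hx : hasStar x = false := by simpa using hxp
      simp only [hx, Bool.false_eq_true, if_false, Bool.false_or]
      rw [List.takeWhile_cons_of_pos (by simp [hx]), List.dropWhile_cons_of_pos (by simp [hx])]
      have harr : pre ++ x :: r = (pre ++ [x]) ++ r := by simp
      have hlen : (pre.length : Int) + 1 = (((pre ++ [x]).length : Nat) : Int) := by
        rw [List.length_append, List.length_singleton]; push_cast; omega
      rw [harr, hlen, ih (pre ++ [x])]
      by_cases hr : r.any hasStar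
      · simp only [hr, if_true]
        have hta : (pre ++ [x]) ++ r.takeWhile (fun x => !hasStar x)
            = pre ++ x :: r.takeWhile (fun x => !hasStar x) := by simp
        rw [hta]
      · simp [hr]

-- a non-'/' char of s lies in some component of s.split('/')
theorem star_in_component (cs : List Char) :
    ('*' ∈ cs) ↔ ∃ x ∈ PySem.Chars.splitOn cs ['/'], '*' ∈ x := by
  rw [splitOn_eq, splitP_mem cs '*' (by decide)]
  constructor
  · rintro (h | ⟨x, hx, hcx⟩)
    · exact ⟨(splitP cs).1, List.mem_cons_self, h⟩
    · exact ⟨x, List.mem_cons_of_mem _ hx, hcx⟩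
  · rintro ⟨x, hx, hcx⟩
    rcases List.mem_cons.mp hx with rfl | hx
    · exact Or.inl hcx
    · exact Or.inr ⟨x, hx, hcx⟩

-- ===== VERDICT (by name: the statement is the Claim_ definition above) =====
theorem split_on_wild_card_spec : Claim_equal_split_on_wild_card := by
  intro s _
  unfold Spec_split_on_wild_card split_on_wild_card split_on_wild_card_alt
  by_cases h1 : PySem.Chars.find s.toList ['*'] = -1
  · -- no wildcard in s: B's scan finds nothing
    have hnostar : '*' ∉ s.toList := (find_star_iff _).mp h1
    have hany : (PySem.Chars.splitOn s.toList ['/']).any hasStar = false := by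
      rw [List.any_eq_false]
      intro x hx
      simp only [hasStar, decide_eq_true_eq]
      exact fun hcx => hnostar ((star_in_component s.toList).mpr ⟨x, hx, hcx⟩)
    have hB : altLoop (PySem.Chars.splitOn s.toList ['/'])
        (PySem.List.enumerate (PySem.Chars.splitOn s.toList ['/']) 0) = none := by
      have h := altLoop_spec (PySem.Chars.splitOn s.toList ['/']) []
      simpa [hany] using h
    rw [if_pos h1]
    by_cases h2 : PySem.Chars.find s.toList ['/'] = -1
    · -- no slash either: split gives the single component s
      have hnoslash : '/' ∉ s.toList := by
        intro hm
        exact (PySem.Chars.find_eq_neg_one_iff s.toList ['/']).mp h2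
          ((singleton_infix_iff '/' s.toList).mpr hm)
      have ht1 : PySem.Chars.splitOn s.toList ['/'] = [s.toList] := by
        rw [splitOn_eq, splitP_no_slash s.toList hnoslash]
      rw [if_pos h2]
      have hno : PySem.Chars.isIn ['*'] s.toList = false := by
        rw [hasStar_isIn]; simp [hasStar, hnostar]
      simp only [ht1, PySem.List.slice_to_neg_one]
      rw [PySem.List.pyGetD_neg_one [s.toList] [] (by simp)]
      simp [PySem.Chars.join, List.intercalate, String.ofList_toList]
      rw [show altLoop [s.toList] [((0 : Int), s.toList)] = none from by
        simp only [altLoop, hno, Bool.false_eq_true, if_false]]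
    · rw [if_neg h2]
      simp only [hB]
  · -- s contains '*': A fills parent/children up to the first wildcard component
    rw [if_neg h1]
    have hstar : '*' ∈ s.toList := by
      by_contra hn; exact h1 ((find_star_iff _).mpr hn)
    have hany : (PySem.Chars.splitOn s.toList ['/']).any hasStar = true := by
      rcases (star_in_component s.toList).mp hstar with ⟨x, hx, hcx⟩
      exact List.any_eq_true.mpr ⟨x, hx, by simp [hasStar, hcx]⟩
    have hfold := foldA_false (PySem.Chars.splitOn s.toList ['/']) [] []
    simp only [hany, if_true, List.nil_append] at hfold
    have hB := altLoop_spec (PySem.Chars.splitOn s.toList ['/']) []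
    simp only [List.nil_append, List.length_nil, Nat.cast_zero, hany, if_true] at hB
    simp only [hfold, hB]
    rw [if_neg (show ¬((true : Bool) = false) by decide)]
    set P := (PySem.Chars.splitOn s.toList ['/']).takeWhile (fun x => !hasStar x) with hP
    set C := (PySem.Chars.splitOn s.toList ['/']).dropWhile (fun x => !hasStar x) with hC
    have hCne : C ≠ [] := by
      intro hnil
      rw [hC, List.dropWhile_eq_nil_iff] at hnil
      rcases List.any_eq_true.mp hany with ⟨x, hx, hsx⟩
      have := hnil x hx
      simp [hsx] at this
    simp only [Prod.mk.injEq]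
    refine ⟨?_, ?_⟩
    · -- parent side
      by_cases hP0 : P = []
      · simp only [hP0, List.length_nil, if_neg (by decide : ¬(0 > 1))]
        decide
      · have hlen : P.length ≠ 0 := fun h => hP0 (List.length_eq_zero_iff.mp h)
        by_cases hP1 : P.length > 1
        · simp [hP1, hP0]
        · have h1' : P.length = 1 := by omega
          rcases List.length_eq_one_iff.mp h1' with ⟨a, ha⟩
          rw [ha]
          simp [PySem.Chars.join_singleton, PySem.List.pyGetD_zero_cons]
      -- children side
    · by_cases hC1 : C.length > 1
      · simp [hC1]
      · have h1' : C.length = 1 := by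
          rcases List.exists_cons_of_ne_nil hCne with ⟨a, as, hCa⟩
          rw [hCa]; rw [hCa] at hC1; simp at hC1 ⊢; omega
        rcases List.length_eq_one_iff.mp h1' with ⟨a, ha⟩
        rw [ha]
        simp [PySem.Chars.join_singleton, PySem.List.pyGetD_zero_cons]
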